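-- pv_equiv track=rewrite | github.com/ayukyo/alltoolkit | Python/magic_square_utils/mod.py | get_all_variations
-- ===== SOURCE A (Python) =====
-- from typing import List, Optional, Tuple, Generator
--
-- def rotate_90(square: List[List[int]]) -> List[List[int]]:
--     """
--     顺时针旋转魔方阵 90 度
--
--     旋转后仍为有效魔方阵
--
--     Args:
--         square: 原魔方阵
--
--     Returns:
--         旋转后的魔方阵
--
--     Examples:
--         >>> square = [[8, 1, 6], [3, 5, 7], [4, 9, 2]]
--         >>> rotated = rotate_90(square)
--         >>> rotated
--         [[4, 3, 8], [9, 5, 1], [2, 7, 6]]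
--     """
--     n = len(square)
--     return [[square[n - 1 - j][i] for j in range(n)] for i in range(n)]
--
-- def flip_horizontal(square: List[List[int]]) -> List[List[int]]:
--     """
--     水平翻转魔方阵（上下镜像）
--
--     翻转后仍为有效魔方阵
--
--     Args:
--         square: 原魔方阵
--
--     Returns:
--         翻转后的魔方阵
--     """
--     return [row[:] for row in reversed(square)]
--
-- def get_all_variations(square: List[List[int]]) -> List[List[List[int]]]:
--     """
--     获取魔方阵的所有变换形式（旋转 × 镜像 = 8 种）
--
--     包括：
--     - 原始形式
--     - 旋转 90°, 180°, 270°
--     - 水平翻转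
--     - 水平翻转后旋转 90°, 180°, 270°
--
--     Args:
--         square: 原魔方阵
--
--     Returns:
--         8 种变换形式的列表
--
--     Examples:
--         >>> square = generate(3)
--         >>> variations = get_all_variations(square)
--         >>> len(variations)
--         8
--         >>> all(is_magic_square(v) for v in variations)
--         True
--     """
--     variations = []
--
--     # 旋转的 4 种形式
--     current = square
--     for _ in range(4):
--         variations.append(current)
--         current = rotate_90(current)
--
--     # 水平翻转后的 4 种形式
--     flipped = flip_horizontal(square)
--     current = flipped
--     for _ in range(4):
--         variations.append(current)
--         current = rotate_90(current)
--
--     return variations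
-- ===== SOURCE B (Python) =====
-- def get_all_variations(square):
--     n = len(square)
--     rng = range(n)
--     return [
--         square,
--         [[square[n - 1 - j][i] for j in rng] for i in rng],
--         [[square[n - 1 - i][n - 1 - j] for j in rng] for i in rng],
--         [[square[j][n - 1 - i] for j in rng] for i in rng],
--         [row[:] for row in reversed(square)],
--         [[square[j][i] for j in rng] for i in rng],
--         [[square[i][n - 1 - j] for j in rng] for i in rng],
--         [[square[n - 1 - j][n - 1 - i] for j in rng] for i in rng],
--     ]
-- ===== Notes on version B (the rewrite author's own statement) =====
-- stated objective: alternative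
-- what changed: B builds all eight variations directly as index comprehensions over the original square (deriving each rotation's index map in closed form) instead of A's iterative repeated composition of rotate_90 on intermediate squares.
import Mathlib
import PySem

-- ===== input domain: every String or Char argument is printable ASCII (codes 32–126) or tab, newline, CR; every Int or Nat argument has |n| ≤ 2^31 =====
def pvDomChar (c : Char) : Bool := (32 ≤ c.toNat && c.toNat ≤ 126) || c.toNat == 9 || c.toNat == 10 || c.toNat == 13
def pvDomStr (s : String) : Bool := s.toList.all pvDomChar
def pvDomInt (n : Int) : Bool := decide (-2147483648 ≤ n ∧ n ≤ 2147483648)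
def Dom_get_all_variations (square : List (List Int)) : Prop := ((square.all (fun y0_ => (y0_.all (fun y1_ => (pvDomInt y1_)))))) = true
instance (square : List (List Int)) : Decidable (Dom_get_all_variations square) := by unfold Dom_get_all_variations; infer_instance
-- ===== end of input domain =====

-- B replaces A's repeated composition of rotate_90 with eight direct index comprehensions over the
-- original square (objective: alternative decomposition, one pass per variation, no intermediate rotations).

-- ===== PORT A =====
-- rotate_90: [[square[n-1-j][i] for j in range(n)] for i in range(n)]
def rotate_90 (square : List (List Int)) : List (List Int) :=
  (PySem.List.pyRange 0 (square.length : Int) 1).map (fun i =>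
    (PySem.List.pyRange 0 (square.length : Int) 1).map (fun j =>
      PySem.List.pyGetD (PySem.List.pyGetD square ((square.length : Int) - 1 - j) []) i 0))

-- flip_horizontal: [row[:] for row in reversed(square)]
def flip_horizontal (square : List (List Int)) : List (List Int) :=
  square.reverse.map (fun row => PySem.List.slice row none none)

def get_all_variations (square : List (List Int)) : List (List (List Int)) :=
  let step := fun (st : List (List (List Int)) × List (List Int)) (_ : Int) =>
    (st.1 ++ [st.2], rotate_90 st.2)
  let st1 := (PySem.List.pyRange 0 4 1).foldl step ([], square)
  let flipped := flip_horizontal square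
  let st2 := (PySem.List.pyRange 0 4 1).foldl step (st1.1, flipped)
  st2.1

-- ===== PORT B =====
def get_all_variations_alt (square : List (List Int)) : List (List (List Int)) :=
  let n : Int := (square.length : Int)
  let rng := PySem.List.pyRange 0 n 1
  [ square,
    rng.map (fun i => rng.map (fun j => PySem.List.pyGetD (PySem.List.pyGetD square (n - 1 - j) []) i 0)),
    rng.map (fun i => rng.map (fun j => PySem.List.pyGetD (PySem.List.pyGetD square (n - 1 - i) []) (n - 1 - j) 0)),
    rng.map (fun i => rng.map (fun j => PySem.List.pyGetD (PySem.List.pyGetD square j []) (n - 1 - i) 0)),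
    square.reverse.map (fun row => PySem.List.slice row none none),
    rng.map (fun i => rng.map (fun j => PySem.List.pyGetD (PySem.List.pyGetD square j []) i 0)),
    rng.map (fun i => rng.map (fun j => PySem.List.pyGetD (PySem.List.pyGetD square i []) (n - 1 - j) 0)),
    rng.map (fun i => rng.map (fun j => PySem.List.pyGetD (PySem.List.pyGetD square (n - 1 - j) []) (n - 1 - i) 0)) ]

-- ===== PRECONDITION & SPEC =====
-- Pre_: every row is at least as long as the matrix is tall — exactly where Python A returns
-- normally; on shorter rows rotate_90 raises IndexError.
def Pre_get_all_variations (square : List (List Int)) : Prop :=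
  ∀ row ∈ square, square.length ≤ row.length
instance (square : List (List Int)) : Decidable (Pre_get_all_variations square) := by
  unfold Pre_get_all_variations; infer_instance

def pvWitness_get_all_variations : List (List Int) := [[8, 1, 6], [3, 5, 7], [4, 9, 2]]

def Spec_get_all_variations (square : List (List Int)) (out : List (List (List Int))) : Prop := out = get_all_variations_alt square
instance (square : List (List Int)) (out : List (List (List Int))) : Decidable (Spec_get_all_variations square out) := by unfold Spec_get_all_variations; infer_instance

-- ===== CLAIM (what is proved, stated in full; the proofs are below) =====
def Claim_equal_get_all_variations : Prop := ∀ (square : List (List Int)), Dom_get_all_variations square → Pre_get_all_variations square → Spec_get_all_variations square (get_all_variations square)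

-- ===== LEMMAS AND PROOFS =====

-- indexing into a comprehension over range(n) picks out the body at the index
theorem getD_map_rng {β : Type} (n : Int) (f : Int → β) (d : β) (k : Int)
    (h0 : 0 ≤ k) (h1 : k < n) :
    PySem.List.pyGetD ((PySem.List.pyRange 0 n 1).map f) k d = f k := by
  rw [PySem.List.pyGetD_eq_getElem _ d h0
    (by simp [PySem.List.length_pyRange_one]; omega)]
  rw [List.getElem_map]
  rw [PySem.List.getElem_pyRange_one]
  simp [Int.toNat_of_nonneg h0]

-- rotating a comprehension-built square is a comprehension over remapped indices
theorem rotate_mk (n : Int) (hn : 0 ≤ n) (g : Int → Int → Int) :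
    rotate_90 ((PySem.List.pyRange 0 n 1).map (fun i => (PySem.List.pyRange 0 n 1).map (fun j => g i j)))
    = (PySem.List.pyRange 0 n 1).map (fun i => (PySem.List.pyRange 0 n 1).map (fun j => g (n - 1 - j) i)) := by
  unfold rotate_90
  have hlen : ((((PySem.List.pyRange 0 n 1).map (fun i => (PySem.List.pyRange 0 n 1).map (fun j => g i j))).length : Int)) = n := by
    simp [PySem.List.length_pyRange_one]; omega
  rw [hlen]
  apply List.map_congr_left
  intro i hi
  apply List.map_congr_left
  intro j hj
  rw [PySem.List.mem_pyRange_one] at hi hj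
  rw [getD_map_rng n _ [] (n - 1 - j) (by omega) (by omega)]
  rw [getD_map_rng n _ 0 i (by omega) (by omega)]

-- indexing a reversed list from the front is indexing the original from the back
theorem getD_reverse {α : Type} (xs : List α) (d : α) (k : Int)
    (h0 : 0 ≤ k) (h1 : k < (xs.length : Int)) :
    PySem.List.pyGetD xs.reverse k d = PySem.List.pyGetD xs ((xs.length : Int) - 1 - k) d := by
  rw [PySem.List.pyGetD_eq_getElem _ d h0 (by simp; omega)]
  rw [PySem.List.pyGetD_eq_getElem _ d (by omega) (by omega)]
  rw [List.getElem_reverse]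
  congr 1
  omega

theorem flip_eq_reverse (square : List (List Int)) :
    flip_horizontal square = square.reverse := by
  unfold flip_horizontal
  simp


theorem rotate_reverse (square : List (List Int)) :
    rotate_90 square.reverse
    = (PySem.List.pyRange 0 (square.length : Int) 1).map (fun i =>
        (PySem.List.pyRange 0 (square.length : Int) 1).map (fun j =>
          PySem.List.pyGetD (PySem.List.pyGetD square j []) i 0)) := by
  unfold rotate_90
  rw [List.length_reverse]
  apply List.map_congr_left
  intro i hi
  apply List.map_congr_left
  intro j hj
  rw [PySem.List.mem_pyRange_one] at hi hj
  rw [getD_reverse square [] ((square.length : Int) - 1 - j) (by omega) (by omega)]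
  have : (square.length : Int) - 1 - ((square.length : Int) - 1 - j) = j := by ring
  rw [this]

theorem get_all_variations_eq (square : List (List Int)) :
    get_all_variations square = get_all_variations_alt square := by
  have h4 : PySem.List.pyRange 0 4 1 = [0, 1, 2, 3] := by decide
  unfold get_all_variations
  rw [h4]
  simp only [List.foldl_cons, List.foldl_nil, List.nil_append, List.cons_append]
  rw [flip_eq_reverse]
  have hR1 : rotate_90 square
      = (PySem.List.pyRange 0 (square.length : Int) 1).map (fun i =>
          (PySem.List.pyRange 0 (square.length : Int) 1).map (fun j =>
            PySem.List.pyGetD (PySem.List.pyGetD square ((square.length : Int) - 1 - j) []) i 0)) := rfl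
  have hn : (0 : Int) ≤ (square.length : Int) := by positivity
  have hR2 := rotate_mk (square.length : Int) hn
      (fun i j => PySem.List.pyGetD (PySem.List.pyGetD square ((square.length : Int) - 1 - j) []) i 0)
  have hR3 := rotate_mk (square.length : Int) hn
      (fun i j => PySem.List.pyGetD (PySem.List.pyGetD square ((square.length : Int) - 1 - i) []) ((square.length : Int) - 1 - j) 0)
  have hF1 := rotate_reverse square
  have hF2 := rotate_mk (square.length : Int) hn
      (fun i j => PySem.List.pyGetD (PySem.List.pyGetD square j []) i 0)
  have hF3 := rotate_mk (square.length : Int) hn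
      (fun i j => PySem.List.pyGetD (PySem.List.pyGetD square i []) ((square.length : Int) - 1 - j) 0)
  simp only at hR2 hR3 hF2 hF3
  have harith : ∀ j : Int, (square.length : Int) - 1 - ((square.length : Int) - 1 - j) = j := by
    intro j; ring
  simp only [harith] at hR3
  have hR2' : rotate_90 (rotate_90 square)
      = (PySem.List.pyRange 0 (square.length : Int) 1).map (fun i =>
          (PySem.List.pyRange 0 (square.length : Int) 1).map (fun j =>
            PySem.List.pyGetD (PySem.List.pyGetD square ((square.length : Int) - 1 - i) []) ((square.length : Int) - 1 - j) 0)) := by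
    rw [hR1]; exact hR2
  have hR3' : rotate_90 (rotate_90 (rotate_90 square))
      = (PySem.List.pyRange 0 (square.length : Int) 1).map (fun i =>
          (PySem.List.pyRange 0 (square.length : Int) 1).map (fun j =>
            PySem.List.pyGetD (PySem.List.pyGetD square j []) ((square.length : Int) - 1 - i) 0)) := by
    rw [hR2']; exact hR3
  have hF2' : rotate_90 (rotate_90 square.reverse)
      = (PySem.List.pyRange 0 (square.length : Int) 1).map (fun i =>
          (PySem.List.pyRange 0 (square.length : Int) 1).map (fun j =>
            PySem.List.pyGetD (PySem.List.pyGetD square i []) ((square.length : Int) - 1 - j) 0)) := by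
    rw [hF1]; exact hF2
  have hF3' : rotate_90 (rotate_90 (rotate_90 square.reverse))
      = (PySem.List.pyRange 0 (square.length : Int) 1).map (fun i =>
          (PySem.List.pyRange 0 (square.length : Int) 1).map (fun j =>
            PySem.List.pyGetD (PySem.List.pyGetD square ((square.length : Int) - 1 - j) []) ((square.length : Int) - 1 - i) 0)) := by
    rw [hF2']; exact hF3
  rw [hR3', hF3', hR2', hF2', hR1, hF1]
  simp [get_all_variations_alt]

-- ===== VERDICT (by name: the statement is the Claim_ definition above) =====
theorem get_all_variations_spec : Claim_equal_get_all_variations := by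
  intro square _ _
  unfold Spec_get_all_variations
  exact get_all_variations_eq square
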